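-- pv_equiv track=rewrite | github.com/karelplanken/fcc-coding-challenges | challenges/265_deepest_brackets.py | get_deepest_brackets
-- ===== SOURCE A (Python) =====
-- OPENING = set('([{')
--
-- CLOSING = set(')]}')
--
-- def get_deepest_brackets(s: str) -> str:
--     depth = max_depth = 0
--     deepest_open = 0
--
--     for i, char in enumerate(s):
--         if char in OPENING:
--             depth += 1
--             if depth > max_depth:
--                 max_depth = depth
--                 deepest_open = i
--         elif char in CLOSING:
--             depth -= 1
--
--     start = deepest_open + 1
--     end = next(i for i, c in enumerate(s[start:], start) if c in CLOSING)
--     return s[start:end]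
-- ===== SOURCE B (Python) =====
-- from itertools import accumulate
--
-- OPENING = set('([{')
--
-- CLOSING = set(')]}')
--
-- def get_deepest_brackets(s: str) -> str:
--     # depths[i] = nesting depth just after s[i]
--     depths = list(accumulate((c in OPENING) - (c in CLOSING) for c in s))
--     best = max((d for c, d in zip(s, depths) if c in OPENING), default=0)
--     if best > 0:
--         deepest_open = next(i for i, (c, d) in enumerate(zip(s, depths))
--                             if c in OPENING and d == best)
--     else:
--         deepest_open = 0
--     start = deepest_open + 1
--     end = start + next(i for i, c in enumerate(s[start:]) if c in CLOSING)
--     return s[start:end]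
-- ===== Notes on version B (the rewrite author's own statement) =====
-- stated objective: alternative
-- what changed: A tracks depth/max/argmax in one stateful loop; B instead builds the prefix-sum depth array with itertools.accumulate, takes the maximum depth over opening-bracket positions with max(..., default=0), and then locates the first opener attaining it, keeping the same closing-bracket scan for the end.
import Mathlib
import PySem

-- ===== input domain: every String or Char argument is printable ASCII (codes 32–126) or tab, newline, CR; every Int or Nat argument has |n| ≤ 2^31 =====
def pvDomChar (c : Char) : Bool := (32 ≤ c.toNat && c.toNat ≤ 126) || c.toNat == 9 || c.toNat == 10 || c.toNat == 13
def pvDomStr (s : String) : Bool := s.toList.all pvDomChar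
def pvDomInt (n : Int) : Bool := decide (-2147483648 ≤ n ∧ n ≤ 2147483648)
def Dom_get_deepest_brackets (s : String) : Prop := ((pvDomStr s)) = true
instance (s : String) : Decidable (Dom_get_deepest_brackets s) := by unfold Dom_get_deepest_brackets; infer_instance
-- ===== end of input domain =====

-- B replaces A's single stateful record-tracking loop by a prefix-sum depth array, a max over opener
-- depths and a first-argmax search (objective: alternative decomposition, same cost).


-- ===== PORT A =====
def pvAOpen (c : Char) : Bool := c == '(' || c == '[' || c == '{'
def pvAClose (c : Char) : Bool := c == ')' || c == ']' || c == '}'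

-- loop body of A: state (depth, max_depth, deepest_open), element (i, char)
def pvAStep (st : Int × Int × Int) (p : Int × Char) : Int × Int × Int :=
  if pvAOpen p.2 then
    if st.1 + 1 > st.2.1 then (st.1 + 1, st.1 + 1, p.1) else (st.1 + 1, st.2.1, st.2.2)
  else if pvAClose p.2 then (st.1 - 1, st.2.1, st.2.2)
  else st

-- literal port of A; where Python's `next` raises StopIteration the find? below is `none`
-- (those inputs are excluded by Pre_) and the port returns ""
def get_deepest_brackets (s : String) : String :=
  let cs := s.toList
  let st := (PySem.List.enumerate cs).foldl pvAStep (0, 0, 0)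
  let start : Int := st.2.2 + 1
  match (PySem.List.enumerate (PySem.List.slice cs (some start) none) start).find?
      (fun p => pvAClose p.2) with
  | some p => String.ofList (PySem.List.slice cs (some start) (some p.1))
  | none => ""

-- ===== PORT B =====
def pvBOpen (c : Char) : Bool := c == '(' || c == '[' || c == '{'
def pvBClose (c : Char) : Bool := c == ')' || c == ']' || c == '}'

-- hand port of itertools.accumulate over the (c in OPENING) - (c in CLOSING) deltas (exact)
def pvAccum (cs : List Char) (d : Int) : List Int :=
  match cs with
  | [] => []
  | c :: t =>
    let d' := d + (if pvBOpen c then 1 else 0) - (if pvBClose c then 1 else 0)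
    d' :: pvAccum t d'

-- best = max((d for c, d in zip(s, depths) if c in OPENING), default=0)
def pvBBest (cs : List Char) (depths : List Int) : Int :=
  PySem.List.maxD (((cs.zip depths).filter (fun p => pvBOpen p.1)).map (·.2)) id 0

-- the if/else computing deepest_open; Python's `next` cannot fail when best > 0,
-- so the `none` branch below is unreachable
def pvBDeep (cs : List Char) (depths : List Int) : Int :=
  if 0 < pvBBest cs depths then
    match (PySem.List.enumerate (cs.zip depths)).find?
        (fun q => pvBOpen q.2.1 && q.2.2 == pvBBest cs depths) with
    | some q => q.1
    | none => 0
  else 0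

-- literal port of B; where Python's `next` raises StopIteration the find? below is `none`
-- (those inputs are excluded by Pre_) and the port returns ""
def get_deepest_brackets_alt (s : String) : String :=
  let cs := s.toList
  let start : Int := pvBDeep cs (pvAccum cs 0) + 1
  match (PySem.List.enumerate (PySem.List.slice cs (some start) none)).find?
      (fun p => pvBClose p.2) with
  | some p => String.ofList (PySem.List.slice cs (some start) (some (start + p.1)))
  | none => ""

-- ===== PRECONDITION & SPEC =====
-- spec-level description (take/map/sum, not either port's loop) of the index A/B call deepest_open
def pvPreDelta (c : Char) : Int :=
  if c == '(' || c == '[' || c == '{' then 1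
  else if c == ')' || c == ']' || c == '}' then -1 else 0
def pvPreDepthAfter (cs : List Char) (i : Nat) : Int := ((cs.take (i + 1)).map pvPreDelta).sum
def pvPreDeepestOpen (cs : List Char) : Nat :=
  let cand := (List.range cs.length).filter
    (fun i => pvPreDelta (cs.getD i ' ') == 1 && decide (0 < pvPreDepthAfter cs i))
  let M := (cand.map (pvPreDepthAfter cs)).foldl max 0
  match cand.find? (fun i => pvPreDepthAfter cs i == M) with
  | some i => i
  | none => 0
-- Pre_ excludes exactly the inputs on which A raises StopIteration: strings with no closing
-- bracket after the position of the deepest opening bracket (index 0 when there is none)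
def Pre_get_deepest_brackets (s : String) : Prop :=
  ((s.toList.drop (pvPreDeepestOpen s.toList + 1)).any (fun c => pvPreDelta c == -1)) = true
instance (s : String) : Decidable (Pre_get_deepest_brackets s) := by
  unfold Pre_get_deepest_brackets; infer_instance

def pvWitness_get_deepest_brackets : String := "a([b{c}d])e"

def Spec_get_deepest_brackets (s : String) (out : String) : Prop := out = get_deepest_brackets_alt s
instance (s : String) (out : String) : Decidable (Spec_get_deepest_brackets s out) := by
  unfold Spec_get_deepest_brackets; infer_instance

-- ===== CLAIM (what is proved, stated in full; the proofs are below) =====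
def Claim_equal_get_deepest_brackets : Prop := ∀ (s : String), Dom_get_deepest_brackets s → Pre_get_deepest_brackets s → Spec_get_deepest_brackets s (get_deepest_brackets s)

-- ===== LEMMAS AND PROOFS =====
-- reference recursions used only by the proofs
def pvDelta (c : Char) : Int := if pvAOpen c then 1 else if pvAClose c then -1 else 0

def pvFinalD : List Char → Int → Int
  | [], d => d
  | c :: t, d => pvFinalD t (d + pvDelta c)

-- (max_depth, deepest_open) of A's loop started at index k with state (d, m, j)
def pvMJ : List Char → Int → Int → Int → Int → Int × Int
  | [], _, _, m, j => (m, j)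
  | c :: t, k, d, m, j =>
    if pvAOpen c then
      if d + 1 > m then pvMJ t (k + 1) (d + 1) (d + 1) k else pvMJ t (k + 1) (d + 1) m j
    else if pvAClose c then pvMJ t (k + 1) (d - 1) m j
    else pvMJ t (k + 1) d m j

-- the depths-after-openers, in order
def pvKeys : List Char → Int → List Int
  | [], _ => []
  | c :: t, d =>
    if pvAOpen c then (d + 1) :: pvKeys t (d + 1)
    else if pvAClose c then pvKeys t (d - 1)
    else pvKeys t d

-- first match of f with its index
def pvFindC : List Char → (Char → Bool) → Option (Nat × Char)
  | [], _ => none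
  | c :: t, f => if f c then some (0, c) else (pvFindC t f).map (fun p => (p.1 + 1, p.2))

theorem pvAOpen_not_close (c : Char) (h : pvAOpen c = true) : pvAClose c = false := by
  simp only [pvAOpen, Bool.or_eq_true, beq_iff_eq] at h
  rcases h with (h | h) | h <;> subst h <;> decide

theorem pv_accum_cons (c : Char) (t : List Char) (d : Int) :
    pvAccum (c :: t) d = (d + pvDelta c) :: pvAccum t (d + pvDelta c) := by
  have hδ : d + (if pvBOpen c then (1 : Int) else 0) - (if pvBClose c then 1 else 0)
      = d + pvDelta c := by
    by_cases ho : pvAOpen c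
    · have hc := pvAOpen_not_close c ho
      simp [pvDelta, ho, show pvBOpen c = true from ho, show pvBClose c = false from hc]
    · have hbo : pvBOpen c = false := by simpa using ho
      by_cases hc : pvAClose c
      · unfold pvDelta
        rw [if_neg ho, if_pos hc]
        simp [hbo, show pvBClose c = true from hc]
        ring
      · have hbc : pvBClose c = false := by simpa using hc
        unfold pvDelta
        rw [if_neg ho, if_neg hc]
        simp [hbo, hbc]
  simp [pvAccum, hδ]

theorem pv_foldA : ∀ (cs : List Char) (k d m j : Int),
    (PySem.List.enumerate cs k).foldl pvAStep (d, m, j)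
      = (pvFinalD cs d, pvMJ cs k d m j) := by
  intro cs
  induction cs with
  | nil => intro k d m j; simp [PySem.List.enumerate, pvFinalD, pvMJ]
  | cons c t ih =>
    intro k d m j
    rw [PySem.List.enumerate_cons, List.foldl_cons]
    by_cases ho : pvAOpen c
    · have hδ : d + pvDelta c = d + 1 := by unfold pvDelta; rw [if_pos ho]
      by_cases hm : d + 1 > m <;>
        simp [pvAStep, ho, hm, pvFinalD, pvMJ, hδ, ih]
    · by_cases hc : pvAClose c
      · have hδ : d + pvDelta c = d - 1 := by unfold pvDelta; rw [if_neg ho, if_pos hc]; ring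
        simp [pvAStep, ho, hc, pvFinalD, pvMJ, hδ, ih]
      · have hδ : d + pvDelta c = d := by unfold pvDelta; rw [if_neg ho, if_neg hc]; ring
        simp [pvAStep, ho, hc, pvFinalD, pvMJ, hδ, ih]

theorem pv_keys_eq : ∀ (cs : List Char) (d : Int),
    ((cs.zip (pvAccum cs d)).filter (fun p => pvBOpen p.1)).map (·.2) = pvKeys cs d := by
  intro cs
  induction cs with
  | nil => intro d; rfl
  | cons c t ih =>
    intro d
    rw [pv_accum_cons,
      show (c :: t).zip ((d + pvDelta c) :: pvAccum t (d + pvDelta c))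
        = (c, d + pvDelta c) :: t.zip (pvAccum t (d + pvDelta c)) from rfl]
    by_cases ho : pvAOpen c
    · have hδ : d + pvDelta c = d + 1 := by unfold pvDelta; rw [if_pos ho]
      rw [hδ]
      simp [pvKeys, ho, show pvBOpen c = true from ho, ih]
    · have hbo : pvBOpen c = false := by simpa using ho
      by_cases hc : pvAClose c
      · have hδ : d + pvDelta c = d - 1 := by unfold pvDelta; rw [if_neg ho, if_pos hc]; ring
        rw [hδ]
        simp [pvKeys, ho, hc, hbo, ih]
      · have hδ : d + pvDelta c = d := by unfold pvDelta; rw [if_neg ho, if_neg hc]; ring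
        rw [hδ]
        simp [pvKeys, ho, hc, hbo, ih]

theorem pv_foldl_max_init : ∀ (l : List Int) (a : Int), a ≤ l.foldl max a := by
  intro l
  induction l with
  | nil => intro a; simp
  | cons x t ih =>
    intro a
    calc a ≤ max a x := le_max_left a x
    _ ≤ t.foldl max (max a x) := ih (max a x)
    _ = (x :: t).foldl max a := rfl

theorem pv_mj_noupdate : ∀ (cs : List Char) (k d m j : Int),
    (pvKeys cs d).foldl max m = m → (pvMJ cs k d m j).2 = j := by
  intro cs
  induction cs with
  | nil => intro k d m j _; rfl
  | cons c t ih =>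
    intro k d m j h
    by_cases ho : pvAOpen c
    · rw [pvKeys] at h
      simp only [ho, if_true, List.foldl_cons] at h
      have h1 := pv_foldl_max_init (pvKeys t (d + 1)) (max m (d + 1))
      rw [h] at h1
      have hm : ¬ d + 1 > m := by omega
      have h2 : max m (d + 1) = m := by omega
      rw [h2] at h
      rw [pvMJ]
      simp only [ho, if_true, hm, if_false]
      exact ih (k + 1) (d + 1) m j h
    · by_cases hc : pvAClose c
      · rw [pvKeys] at h
        simp only [ho, hc, if_true] at h
        rw [pvMJ]
        simp only [ho, hc, if_true]
        exact ih _ _ _ _ h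
      · rw [pvKeys] at h
        simp only [ho, hc] at h
        rw [pvMJ]
        simp only [ho, hc]
        exact ih _ _ _ _ h

theorem pv_mj_find : ∀ (cs : List Char) (T k d m j : Int),
    (pvKeys cs d).foldl max m = T → m < T →
    ∃ ch, (PySem.List.enumerate (cs.zip (pvAccum cs d)) k).find?
        (fun q => pvBOpen q.2.1 && q.2.2 == T) = some ((pvMJ cs k d m j).2, ch, T) := by
  intro cs
  induction cs with
  | nil => intro T k d m j h hlt; rw [pvKeys] at h; simp at h; omega
  | cons c t ih =>
    intro T k d m j h hlt
    rw [pv_accum_cons,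
      show (c :: t).zip ((d + pvDelta c) :: pvAccum t (d + pvDelta c))
        = (c, d + pvDelta c) :: t.zip (pvAccum t (d + pvDelta c)) from rfl,
      PySem.List.enumerate_cons]
    by_cases ho : pvAOpen c
    · have hδ : d + pvDelta c = d + 1 := by unfold pvDelta; rw [if_pos ho]
      rw [hδ]
      rw [pvKeys] at h
      simp only [ho, if_true, List.foldl_cons] at h
      by_cases hm : d + 1 > m
      · have hmx : max m (d + 1) = d + 1 := by omega
        rw [hmx] at h
        by_cases hT : d + 1 = T
        · refine ⟨c, ?_⟩
          rw [List.find?_cons_of_pos (by simp [show pvBOpen c = true from ho, hT])]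
          rw [pvMJ]
          simp only [ho, if_true, hm, if_true]
          rw [pv_mj_noupdate t (k + 1) (d + 1) (d + 1) k (by rw [h, hT])]
          rw [hT]
        · have hT2 : d + 1 < T := by
            have h1 := pv_foldl_max_init (pvKeys t (d + 1)) (d + 1)
            rw [h] at h1
            omega
          rw [List.find?_cons_of_neg (by simp [hT])]
          rw [pvMJ]
          simp only [ho, if_true, hm, if_true]
          exact ih T (k + 1) (d + 1) (d + 1) k h hT2
      · have hmx : max m (d + 1) = m := by omega
        rw [hmx] at h
        rw [List.find?_cons_of_neg (by
          have : ¬ ((d + 1 : Int) = T) := by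
            have h1 := pv_foldl_max_init (pvKeys t (d + 1)) m
            omega
          simp [this])]
        rw [pvMJ]
        simp only [ho, if_true, hm, if_false]
        exact ih T (k + 1) (d + 1) m j h hlt
    · have hbo : pvBOpen c = false := by simpa using ho
      rw [List.find?_cons_of_neg (by simp [hbo])]
      by_cases hc : pvAClose c
      · have hδ : d + pvDelta c = d - 1 := by unfold pvDelta; rw [if_neg ho, if_pos hc]; ring
        rw [hδ]
        rw [pvKeys] at h
        simp only [ho, hc, if_true] at h
        rw [pvMJ]
        simp only [ho, hc, if_true]
        exact ih T (k + 1) (d - 1) m j h hlt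
      · have hδ : d + pvDelta c = d := by unfold pvDelta; rw [if_neg ho, if_neg hc]; ring
        rw [hδ]
        rw [pvKeys] at h
        simp only [ho, hc] at h
        rw [pvMJ]
        simp only [ho, hc]
        exact ih T (k + 1) d m j h hlt

theorem pv_foldl_max_comm : ∀ (l : List Int) (a b : Int),
    l.foldl max (max a b) = max a (l.foldl max b) := by
  intro l
  induction l with
  | nil => intro a b; rfl
  | cons x t ih =>
    intro a b
    rw [List.foldl_cons, List.foldl_cons, max_assoc, ih]

theorem pv_max?_cons : ∀ (ks : List Int) (k : Int),
    PySem.List.max? (k :: ks) id = some (ks.foldl max k) := by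
  intro ks
  induction ks with
  | nil => intro k; rfl
  | cons x t ih =>
    intro k
    change List.foldl _ (if id k < id x then some x else some k) t
      = some (List.foldl max (max k x) t)
    by_cases h : k < x
    · rw [if_pos (show id k < id x from h)]
      have hx : max k x = x := by omega
      rw [hx]
      exact ih x
    · rw [if_neg (show ¬ id k < id x from h)]
      have hx : max k x = k := by omega
      rw [hx]
      exact ih k

-- B's deepest_open equals the third component of A's loop state
theorem pv_deep_eq (cs : List Char) : pvBDeep cs (pvAccum cs 0) = (pvMJ cs 0 0 0 0).2 := by
  unfold pvBDeep pvBBest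
  rw [pv_keys_eq]
  cases hk : pvKeys cs 0 with
  | nil =>
    simp only [PySem.List.maxD, PySem.List.max?, List.foldl_nil, Option.getD_none]
    rw [pv_mj_noupdate cs 0 0 0 0 (by rw [hk]; rfl)]
    norm_num
  | cons k ks =>
    rw [PySem.List.maxD, pv_max?_cons, Option.getD_some]
    by_cases hv : 0 < ks.foldl max k
    · have hT : (pvKeys cs 0).foldl max 0 = ks.foldl max k := by
        rw [hk, List.foldl_cons, pv_foldl_max_comm ks 0 k]
        omega
      obtain ⟨ch, hfind⟩ := pv_mj_find cs (ks.foldl max k) 0 0 0 0 hT hv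
      simp only [hv, if_true, hfind]
    · have hT : (pvKeys cs 0).foldl max 0 = 0 := by
        rw [hk, List.foldl_cons, pv_foldl_max_comm ks 0 k]
        omega
      rw [pv_mj_noupdate cs 0 0 0 0 hT]
      simp [hv]

theorem pv_find_en : ∀ (l : List Char) (k : Int) (f : Char → Bool),
    (PySem.List.enumerate l k).find? (fun p => f p.2)
      = (pvFindC l f).map (fun p => ((k + (p.1 : Int), p.2) : Int × Char)) := by
  intro l
  induction l with
  | nil => intro k f; rfl
  | cons c t ih =>
    intro k f
    rw [PySem.List.enumerate_cons, pvFindC]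
    by_cases hf : f c
    · rw [List.find?_cons_of_pos (by simpa using hf)]
      simp [hf]
    · rw [List.find?_cons_of_neg (by simpa using hf)]
      simp only [hf, ih (k + 1) f]
      cases pvFindC t f with
      | none => rfl
      | some p =>
        simp
        omega

-- the shared closing-bracket scan produces the same slice on both sides
theorem pv_tail_eq (cs : List Char) (st : Int) :
    (match (PySem.List.enumerate (PySem.List.slice cs (some st) none) st).find?
        (fun p => pvAClose p.2) with
     | some p => String.ofList (PySem.List.slice cs (some st) (some p.1))
     | none => "")
    = (match (PySem.List.enumerate (PySem.List.slice cs (some st) none)).find?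
        (fun p => pvBClose p.2) with
     | some p => String.ofList (PySem.List.slice cs (some st) (some (st + p.1)))
     | none => "") := by
  have hcl : pvBClose = pvAClose := rfl
  rw [hcl, pv_find_en, pv_find_en]
  cases pvFindC (PySem.List.slice cs (some st) none) pvAClose with
  | none => rfl
  | some p =>
    simp only [Option.map_some]
    have hi : st + ((p.1 : Int)) = st + (0 + (p.1 : Int)) := by omega
    rw [← hi]

-- ===== VERDICT (by name: the statement is the Claim_ definition above) =====
theorem get_deepest_brackets_spec : Claim_equal_get_deepest_brackets := by
  intro s _ _
  unfold Spec_get_deepest_brackets get_deepest_brackets get_deepest_brackets_alt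
  simp only [pv_foldA]
  rw [show (pvFinalD s.toList 0, pvMJ s.toList 0 0 0 0).2.2 = (pvMJ s.toList 0 0 0 0).2 from rfl,
    ← pv_deep_eq s.toList]
  exact pv_tail_eq s.toList (pvBDeep s.toList (pvAccum s.toList 0) + 1)
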